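-- pv_equiv track=rewrite | github.com/LeslieJury/IEEExtreme2024_python_code | bounded_tuples.py | solve
-- ===== SOURCE A (Python) =====
-- def calculate_optimal_cost(A, l, r):
--     # Calculate the optimal cost for the subarray A[l:r+1]
--     k = r - l + 1
--     mid = (l + r) // 2
--     max_cost = 0
--
--     # If k is even
--     if k % 2 == 0:
--         for i in range(k // 2):
--             max_cost = max(max_cost, A[l + i] + A[r - i])
--     else:
--         # If k is odd, handle the middle element
--         for i in range(k // 2):
--             max_cost = max(max_cost, A[l + i] + A[r - i])
--         max_cost = max(max_cost, A[mid])  # Include the middle element for odd length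
--
--     return max_cost
--
-- def solve(N, Q, A, queries):
--     optimal_costs = []
--
--     # Calculate optimal costs for all subarrays
--     for l in range(N):
--         for r in range(l, N):
--             cost = calculate_optimal_cost(A, l, r)
--             optimal_costs.append((cost, A[r] - A[l]))  # Store (cost, difference)
--
--     # Sort by cost to efficiently answer queries
--     optimal_costs.sort()
--
--     results = []
--
--     # Process each query
--     for x in queries:
--         total_sum = 0
--         for cost, diff in optimal_costs:
--             if cost <= x:
--                 total_sum += diff
--             else:
--                 break
--         results.append(total_sum)
--
--     return results
-- ===== SOURCE B (Python) =====
-- def solve(N, Q, A, queries):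
--     # Two-pointer cost per subarray; no sort: each query sums diffs of pairs with cost <= x directly.
--     pairs = []
--     for l in range(N):
--         for r in range(l, N):
--             best = 0
--             i, j = l, r
--             while i < j:
--                 best = max(best, A[i] + A[j])
--                 i += 1
--                 j -= 1
--             if i == j:
--                 best = max(best, A[i])
--             pairs.append((best, A[r] - A[l]))
--     return [sum(d for c, d in pairs if c <= x) for x in queries]
-- ===== Notes on version B (the rewrite author's own statement) =====
-- stated objective: alternative
-- what changed: B computes each subarray's cost with an inward two-pointer walk instead of an indexed half-range loop with a separate odd-length middle case, and answers each query by summing the diffs of pairs whose cost <= x over the unsorted pair list directly, removing A's sort pass and break-scan.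
import Mathlib
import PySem

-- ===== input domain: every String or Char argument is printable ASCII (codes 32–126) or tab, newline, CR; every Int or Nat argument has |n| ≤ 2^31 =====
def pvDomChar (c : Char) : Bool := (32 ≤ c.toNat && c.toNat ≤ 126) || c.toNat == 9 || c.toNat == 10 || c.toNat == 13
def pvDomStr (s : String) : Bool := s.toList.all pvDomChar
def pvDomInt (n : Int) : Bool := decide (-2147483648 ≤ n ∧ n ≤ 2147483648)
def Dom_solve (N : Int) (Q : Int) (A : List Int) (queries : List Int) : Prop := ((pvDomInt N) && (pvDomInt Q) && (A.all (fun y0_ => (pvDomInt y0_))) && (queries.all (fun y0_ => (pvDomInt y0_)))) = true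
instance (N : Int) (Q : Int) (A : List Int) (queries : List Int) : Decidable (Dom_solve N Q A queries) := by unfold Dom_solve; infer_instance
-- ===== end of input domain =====

-- B drops A's sort and per-query break-scan (it sums a direct filter of the unsorted pair list)
-- and computes each subarray cost by a two-pointer recursion instead of an indexed half-range loop.

-- ===== PORT A =====
def calcOptimalCost (Ar : List Int) (l r : Int) : Int :=
  let k := r - l + 1
  let mid := PySem.Int.floordiv (l + r) 2
  let maxCost : Int := 0
  if PySem.Int.mod k 2 = 0 then
    (PySem.List.pyRange 0 (PySem.Int.floordiv k 2) 1).foldl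
      (fun m i => max m (PySem.List.pyGetD Ar (l + i) 0 + PySem.List.pyGetD Ar (r - i) 0)) maxCost
  else
    max ((PySem.List.pyRange 0 (PySem.Int.floordiv k 2) 1).foldl
      (fun m i => max m (PySem.List.pyGetD Ar (l + i) 0 + PySem.List.pyGetD Ar (r - i) 0)) maxCost)
      (PySem.List.pyGetD Ar mid 0)

-- A's per-query loop: 'for cost, diff in optimal_costs: if cost <= x: total += diff else: break'
def scanQuery (pairs : List (Int × Int)) (x : Int) (total : Int) : Int :=
  match pairs with
  | [] => total
  | (c, d) :: rest => if c ≤ x then scanQuery rest x (total + d) else total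

def solve (N : Int) (Q : Int) (A : List Int) (queries : List Int) : List Int :=
  let optimalCosts : List (Int × Int) :=
    (PySem.List.pyRange 0 N 1).foldl (fun acc l =>
      (PySem.List.pyRange l N 1).foldl (fun acc2 r =>
        acc2 ++ [(calcOptimalCost A l r,
                  PySem.List.pyGetD A r 0 - PySem.List.pyGetD A l 0)]) acc) []
  let sortedCosts := PySem.List.sorted2 optimalCosts (fun p => p.1) (fun p => p.2)
  queries.foldl (fun res x => res ++ [scanQuery sortedCosts x 0]) []

-- ===== PORT B =====
-- B's two-pointer cost: i,j walk inwards; max with the middle element if they meet.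
def twoPtrCost (Ar : List Int) (i j best : Int) : Int :=
  if i < j then
    twoPtrCost Ar (i + 1) (j - 1)
      (max best (PySem.List.pyGetD Ar i 0 + PySem.List.pyGetD Ar j 0))
  else if i = j then max best (PySem.List.pyGetD Ar i 0)
  else best
termination_by (j - i).toNat
decreasing_by omega

def solve_alt (N : Int) (Q : Int) (A : List Int) (queries : List Int) : List Int :=
  let pairs : List (Int × Int) :=
    (PySem.List.pyRange 0 N 1).foldl (fun acc l =>
      (PySem.List.pyRange l N 1).foldl (fun acc2 r =>
        acc2 ++ [(twoPtrCost A l r 0,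
                  PySem.List.pyGetD A r 0 - PySem.List.pyGetD A l 0)]) acc) []
  queries.map (fun x => ((pairs.filter (fun p => decide (p.1 ≤ x))).map (fun p => p.2)).sum)

-- ===== PRECONDITION & SPEC =====
-- Pre_ excludes exactly the inputs where the Python A raises IndexError: N > len(A).
def Pre_solve (N : Int) (Q : Int) (A : List Int) (queries : List Int) : Prop :=
  N ≤ (A.length : Int)
instance (N : Int) (Q : Int) (A : List Int) (queries : List Int) : Decidable (Pre_solve N Q A queries) := by unfold Pre_solve; infer_instance

def pvWitness_solve : Int × Int × List Int × List Int := (3, 1, [2, -1, 4], [3])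

def Spec_solve (N : Int) (Q : Int) (A : List Int) (queries : List Int) (out : List Int) : Prop := out = solve_alt N Q A queries
instance (N : Int) (Q : Int) (A : List Int) (queries : List Int) (out : List Int) : Decidable (Spec_solve N Q A queries out) := by unfold Spec_solve; infer_instance

-- ===== CLAIM (what is proved, stated in full; the proofs are below) =====
def Claim_equal_solve : Prop := ∀ (N : Int) (Q : Int) (A : List Int) (queries : List Int), Dom_solve N Q A queries → Pre_solve N Q A queries → Spec_solve N Q A queries (solve N Q A queries)

-- ===== LEMMAS AND PROOFS =====

-- the two cost computations agree (stated with a general initial accumulator for the induction)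
theorem twoPtr_eq_fold (Ar : List Int) :
    ∀ n (i j best : Int), (j - i + 1).toNat ≤ n → -1 ≤ j - i →
    twoPtrCost Ar i j best =
      (if PySem.Int.mod (j - i + 1) 2 = 0 then
        (PySem.List.pyRange 0 (PySem.Int.floordiv (j - i + 1) 2) 1).foldl
          (fun m t => max m (PySem.List.pyGetD Ar (i + t) 0 + PySem.List.pyGetD Ar (j - t) 0)) best
      else
        max ((PySem.List.pyRange 0 (PySem.Int.floordiv (j - i + 1) 2) 1).foldl
          (fun m t => max m (PySem.List.pyGetD Ar (i + t) 0 + PySem.List.pyGetD Ar (j - t) 0)) best)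
          (PySem.List.pyGetD Ar (PySem.Int.floordiv (i + j) 2) 0)) := by
  intro n
  induction n with
  | zero =>
    intro i j best h1 h2
    have hj : j = i - 1 := by omega
    subst hj
    rw [twoPtrCost]
    have e0 : i - 1 - i + 1 = (0:Int) := by ring
    rw [e0]
    simp [PySem.Int.mod, PySem.Int.floordiv, PySem.List.pyRange_one_eq_nil (by norm_num : (0:Int) ≤ 0)]
    omega
  | succ n ih =>
    intro i j best h1 h2
    by_cases hb : j - i = -1
    · have hj : j = i - 1 := by omega
      subst hj
      rw [twoPtrCost]
      have e0 : i - 1 - i + 1 = (0:Int) := by ring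
      rw [e0]
      simp [PySem.Int.mod, PySem.Int.floordiv, PySem.List.pyRange_one_eq_nil (by norm_num : (0:Int) ≤ 0)]
      omega
    · by_cases he : j = i
      · subst he
        rw [twoPtrCost]
        have e1 : j - j + 1 = (1:Int) := by ring
        rw [e1]
        have hm1 : PySem.Int.mod 1 2 = 1 := by decide
        have hd1 : PySem.Int.floordiv 1 2 = 0 := by decide
        have hmid : PySem.Int.floordiv (j + j) 2 = j := by
          rw [PySem.Int.floordiv_eq_ediv_of_pos (by norm_num)]; omega
        rw [hm1, hd1, hmid]
        simp [PySem.List.pyRange_one_eq_nil (by norm_num : (0:Int) ≤ 0)]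
      · have hlt : i < j := by omega
        rw [twoPtrCost]
        simp only [if_pos hlt]
        rw [ih (i+1) (j-1) _ (by omega) (by omega)]
        have hmid : i + 1 + (j - 1) = i + j := by ring
        rw [hmid]
        have hpar : PySem.Int.mod (j - 1 - (i + 1) + 1) 2 = PySem.Int.mod (j - i + 1) 2 := by
          simp only [PySem.Int.mod_eq_emod_of_pos (show (0:Int) < 2 by norm_num)]
          omega
        rw [hpar]
        have hK : 0 < PySem.Int.floordiv (j - i + 1) 2 := by
          rw [PySem.Int.floordiv_eq_ediv_of_pos (by norm_num)]; omega
        have hK' : PySem.Int.floordiv (j - 1 - (i + 1) + 1) 2 = PySem.Int.floordiv (j - i + 1) 2 - 1 := by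
          simp only [PySem.Int.floordiv_eq_ediv_of_pos (show (0:Int) < 2 by norm_num)]
          omega
        have hfold :
            (PySem.List.pyRange 0 (PySem.Int.floordiv (j - 1 - (i + 1) + 1) 2) 1).foldl
              (fun m t => max m (PySem.List.pyGetD Ar (i + 1 + t) 0 + PySem.List.pyGetD Ar (j - 1 - t) 0))
              (max best (PySem.List.pyGetD Ar i 0 + PySem.List.pyGetD Ar j 0)) =
            (PySem.List.pyRange 0 (PySem.Int.floordiv (j - i + 1) 2) 1).foldl
              (fun m t => max m (PySem.List.pyGetD Ar (i + t) 0 + PySem.List.pyGetD Ar (j - t) 0)) best := by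
          rw [hK', PySem.List.pyRange_one_cons hK]
          simp only [List.foldl_cons, add_zero, sub_zero]
          have h01 : (0:Int) + 1 = 1 := by norm_num
          rw [h01, PySem.List.pyRange_one 0, PySem.List.pyRange_one 1]
          rw [List.foldl_map, List.foldl_map]
          have hn : (PySem.Int.floordiv (j - i + 1) 2 - 1 - 0).toNat
              = (PySem.Int.floordiv (j - i + 1) 2 - 1).toNat := by omega
          rw [hn]
          apply PySem.List.foldl_congr_mem
          intro m t _
          have e1 : i + 1 + (0 + (t:Int)) = i + (1 + t) := by ring
          have e2 : j - 1 - (0 + (t:Int)) = j - (1 + t) := by ring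
          rw [e1, e2]
        rw [hfold]

theorem calc_eq_twoPtr (Ar : List Int) (l r : Int) (h : l ≤ r) :
    calcOptimalCost Ar l r = twoPtrCost Ar l r 0 := by
  rw [twoPtr_eq_fold Ar (r - l + 1).toNat l r 0 le_rfl (by omega)]
  rfl

-- the pair lists built by the two double loops coincide
theorem pairs_eq (N : Int) (A : List Int) (acc : List (Int × Int)) :
    (PySem.List.pyRange 0 N 1).foldl (fun acc l =>
      (PySem.List.pyRange l N 1).foldl (fun acc2 r =>
        acc2 ++ [(calcOptimalCost A l r,
                  PySem.List.pyGetD A r 0 - PySem.List.pyGetD A l 0)]) acc) acc =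
    (PySem.List.pyRange 0 N 1).foldl (fun acc l =>
      (PySem.List.pyRange l N 1).foldl (fun acc2 r =>
        acc2 ++ [(twoPtrCost A l r 0,
                  PySem.List.pyGetD A r 0 - PySem.List.pyGetD A l 0)]) acc) acc := by
  apply PySem.List.foldl_congr_mem
  intro acc1 l _
  apply PySem.List.foldl_congr_mem
  intro acc2 r hr
  have hlr : l ≤ r := (PySem.List.mem_pyRange_one.mp hr).1
  rw [calc_eq_twoPtr A l r hlr]

theorem mem_insertBy' {α : Type} (before : α → α → Bool) (x z : α) :
    ∀ (ys : List α), z ∈ PySem.List.insertBy before x ys → z = x ∨ z ∈ ys := by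
  intro ys
  induction ys with
  | nil => simp [PySem.List.insertBy]
  | cons y ys ih =>
    simp only [PySem.List.insertBy]
    by_cases h : before x y
    · simp [h]
    · simp [h]
      intro hz
      rcases hz with hz | hz
      · tauto
      · rcases ih hz with h' | h' <;> tauto

-- ordered insertion with the sort's lexicographic 'before' keeps the list sorted by first component
theorem pairwise_fst_insertBy (x : Int × Int) :
    ∀ (ys : List (Int × Int)), ys.Pairwise (fun a b => a.1 ≤ b.1) →
    (PySem.List.insertBy
      (fun a b => decide (a.1 < b.1) || !decide (b.1 < a.1) && decide (a.2 < b.2)) x ys).Pairwise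
      (fun a b : Int × Int => a.1 ≤ b.1) := by
  intro ys
  induction ys with
  | nil => intro _; simp [PySem.List.insertBy]
  | cons y ys ih =>
    intro h
    rcases List.pairwise_cons.mp h with ⟨hy, hys⟩
    simp only [PySem.List.insertBy]
    by_cases hb : (decide (x.1 < y.1) || !decide (y.1 < x.1) && decide (x.2 < y.2)) = true
    · simp only [hb, if_pos]
      have hxy : x.1 ≤ y.1 := by
        simp only [Bool.or_eq_true, Bool.and_eq_true, decide_eq_true_eq, Bool.not_eq_true',
          decide_eq_false_iff_not] at hb
        rcases hb with h' | ⟨h', _⟩ <;> omega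
      refine List.pairwise_cons.mpr ⟨?_, h⟩
      intro z hz
      rcases hz with _ | hz
      · exact hxy
      · exact le_trans hxy (hy _ (by assumption))
    · simp only [hb, if_neg, Bool.false_eq_true, not_false_eq_true]
      have hyx : y.1 ≤ x.1 := by
        simp only [Bool.or_eq_true, Bool.and_eq_true, decide_eq_true_eq, Bool.not_eq_true',
          decide_eq_false_iff_not] at hb
        omega
      refine List.pairwise_cons.mpr ⟨?_, ih hys⟩
      intro z hz
      rcases mem_insertBy' _ x z ys hz with h' | h'
      · subst h'; exact hyx
      · exact hy _ h'

theorem pairwise_fst_foldl_insertBy :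
    ∀ (xs acc : List (Int × Int)), acc.Pairwise (fun a b => a.1 ≤ b.1) →
    (xs.foldl (fun acc x => PySem.List.insertBy
      (fun a b => decide (a.1 < b.1) || !decide (b.1 < a.1) && decide (a.2 < b.2)) x acc) acc).Pairwise
      (fun a b : Int × Int => a.1 ≤ b.1) := by
  intro xs
  induction xs with
  | nil => intro acc h; exact h
  | cons x xs ih =>
    intro acc h
    exact ih _ (pairwise_fst_insertBy x acc h)

theorem pairwise_fst_sorted2 (xs : List (Int × Int)) :
    (PySem.List.sorted2 xs (fun p => p.1) (fun p => p.2)).Pairwise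
      (fun a b : Int × Int => a.1 ≤ b.1) := by
  have h : PySem.List.sorted2 xs (fun p : Int × Int => p.1) (fun p => p.2) =
      xs.foldl (fun acc x => PySem.List.insertBy
        (fun a b => decide (a.1 < b.1) || !decide (b.1 < a.1) && decide (a.2 < b.2)) x acc) [] := rfl
  rw [h]
  exact pairwise_fst_foldl_insertBy xs [] (by simp)

-- on a list sorted by cost, A's break-scan is the filtered sum
theorem scanQuery_eq_filter_sum (x : Int) :
    ∀ (l : List (Int × Int)), l.Pairwise (fun a b => a.1 ≤ b.1) → ∀ acc,
    scanQuery l x acc = acc + ((l.filter (fun p => decide (p.1 ≤ x))).map (fun p => p.2)).sum := by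
  intro l
  induction l with
  | nil => intro _ acc; simp [scanQuery]
  | cons p rest ih =>
    intro h acc
    rcases List.pairwise_cons.mp h with ⟨hp, hrest⟩
    obtain ⟨c, d⟩ := p
    by_cases hc : c ≤ x
    · rw [scanQuery]
      simp only [if_pos hc]
      rw [ih hrest (acc + d)]
      simp [hc, add_assoc]
    · rw [scanQuery]
      simp only [if_neg hc]
      have hnil : rest.filter (fun p => decide (p.1 ≤ x)) = [] := by
        apply List.filter_eq_nil_iff.mpr
        intro q hq
        have := hp q hq
        simp only [decide_eq_true_eq]
        omega
      simp [hc, hnil]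

-- the full query pipelines agree for any pair list
theorem queries_eq (queries : List Int) (pairs : List (Int × Int)) :
    queries.foldl (fun res x =>
      res ++ [scanQuery (PySem.List.sorted2 pairs (fun p => p.1) (fun p => p.2)) x 0]) [] =
    queries.map (fun x => ((pairs.filter (fun p => decide (p.1 ≤ x))).map (fun p => p.2)).sum) := by
  rw [PySem.List.foldl_append_singleton_eq_map]
  rw [List.nil_append]
  apply List.map_congr_left
  intro x _
  rw [scanQuery_eq_filter_sum x _ (pairwise_fst_sorted2 pairs) 0]
  rw [zero_add]
  have hperm : (PySem.List.sorted2 pairs (fun p : Int × Int => p.1) (fun p => p.2)).Perm pairs :=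
    PySem.List.sorted2_perm pairs _ _ false
  exact ((hperm.filter _).map _).sum_eq

-- ===== VERDICT (by name: the statement is the Claim_ definition above) =====
theorem solve_spec : Claim_equal_solve := by
  intro N Q A queries _ _
  unfold Spec_solve solve solve_alt
  rw [pairs_eq]
  exact queries_eq queries _
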